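-- pv_equiv track=rewrite | github.com/womogenes/AoC-2023-Solutions | day_14/day_14_p2.py | north_load
-- ===== SOURCE A (Python) =====
-- def north_load(grid):
--     n, m = len(grid), len(grid[0])
--
--     # Process column j
--     ans = 0
--     for i in range(n):
--         for j in range(m):
--             if grid[i][j] == "O":
--                 ans += n - i
--     return ans
-- ===== SOURCE B (Python) =====
-- def north_load(grid):
--     # Telescoping prefix-sum: a rock in row i contributes 1 to 'seen' for each of
--     # the n - i iterations from its row to the bottom, so total = sum_i (n-i)*c_i.
--     total = 0
--     seen = 0
--     for row in grid:
--         seen += row.count("O")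
--         total += seen
--     return total
-- ===== Notes on version B (the rewrite author's own statement) =====
-- stated objective: alternative
-- what changed: Replaces the nested per-cell weighted accumulation by a telescoping prefix-sum: a running count of rocks seen so far is added to the total once per row, so each rock is counted once for every row from its own to the bottom, with no index arithmetic or multiplication.
-- intended difference: On ragged grids where some row carries an 'O' beyond the first row's width, A silently ignores those cells (it only scans len(grid[0]) columns) and returns an undercount, while B counts every 'O' with its row weight, which is the intended north-beam load. — e.g. on north_load([["."], ["O", "O"]]): A returns 1, B returns 2
import Mathlib
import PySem

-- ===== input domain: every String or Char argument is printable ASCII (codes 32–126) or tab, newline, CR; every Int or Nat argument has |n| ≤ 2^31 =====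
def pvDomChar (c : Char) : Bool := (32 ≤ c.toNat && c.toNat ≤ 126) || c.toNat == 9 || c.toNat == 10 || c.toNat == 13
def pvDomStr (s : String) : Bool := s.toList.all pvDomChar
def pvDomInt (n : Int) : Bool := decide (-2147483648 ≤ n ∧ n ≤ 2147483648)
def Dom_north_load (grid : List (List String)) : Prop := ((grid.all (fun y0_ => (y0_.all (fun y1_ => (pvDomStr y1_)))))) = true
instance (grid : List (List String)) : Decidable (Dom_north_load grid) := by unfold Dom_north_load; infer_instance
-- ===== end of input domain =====

-- B replaces A's nested per-cell weighted accumulation by a telescoping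
-- prefix-sum: a running count of rocks seen so far is added to the total once
-- per row, with no index arithmetic or multiplication (objective: alternative).

-- ===== PORT A =====
def north_load (grid : List (List String)) : Int :=
  let n : Int := grid.length
  let m : Int := ((PySem.List.pyGetD grid 0 []).length : Int)
  (PySem.List.pyRange 0 n 1).foldl (fun ans i =>
    (PySem.List.pyRange 0 m 1).foldl (fun ans j =>
      if PySem.List.pyGetD (PySem.List.pyGetD grid i []) j "" = "O" then ans + (n - i) else ans)
      ans) 0

-- ===== PORT B =====
def north_load_alt (grid : List (List String)) : Int :=
  (grid.foldl (fun (p : Int × Int) row =>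
    let seen := p.1 + (PySem.List.count row "O" : Int)
    (seen, p.2 + seen)) ((0 : Int), (0 : Int))).2

-- ===== PRECONDITION & SPEC =====
-- Pre_ excludes exactly the inputs where A raises IndexError: the empty grid
-- (grid[0]) and grids with a row shorter than the first row (grid[i][j]).
def Pre_north_load (grid : List (List String)) : Prop :=
  grid ≠ [] ∧ ∀ row ∈ grid, (grid.headD []).length ≤ row.length
instance (grid : List (List String)) : Decidable (Pre_north_load grid) := by
  unfold Pre_north_load; infer_instance

def pvWitness_north_load : List (List String) := [["O", "."], [".", "O"]]

-- On ragged grids where some row carries an "O" beyond the first row's width, A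
-- silently ignores those cells (it scans only len(grid[0]) columns) and returns an
-- undercount, while B counts every "O" with its row weight, the intended north-beam load.
def D_north_load (grid : List (List String)) : Prop :=
  ∃ row ∈ grid, "O" ∈ row.drop (grid.headD []).length
instance (grid : List (List String)) : Decidable (D_north_load grid) := by
  unfold D_north_load; infer_instance

def Spec_north_load (grid : List (List String)) (out : Int) : Prop :=
  ¬ D_north_load grid → out = north_load_alt grid
instance (grid : List (List String)) (out : Int) : Decidable (Spec_north_load grid out) := by
  unfold Spec_north_load; infer_instance

def pvDiffWitness_north_load : List (List String) := [["."], ["O", "O"]]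
def pvDiffWitnessOut_north_load : Int × Int := (1, 2)

-- ===== CLAIM (what is proved, stated in full; the proofs are below) =====
def Claim_unchanged_north_load : Prop :=
  ∀ (grid : List (List String)), Dom_north_load grid → Pre_north_load grid →
    Spec_north_load grid (north_load grid)
def Claim_changed_north_load : Prop :=
  Dom_north_load (pvDiffWitness_north_load) ∧ Pre_north_load (pvDiffWitness_north_load) ∧
  D_north_load (pvDiffWitness_north_load) ∧
  north_load (pvDiffWitness_north_load) = pvDiffWitnessOut_north_load.1 ∧
  north_load_alt (pvDiffWitness_north_load) = pvDiffWitnessOut_north_load.2 ∧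
  pvDiffWitnessOut_north_load.1 ≠ pvDiffWitnessOut_north_load.2
def Claim_exact_north_load : Prop :=
  ∀ (grid : List (List String)), Dom_north_load grid → Pre_north_load grid →
    D_north_load grid → north_load grid ≠ north_load_alt grid

-- ===== LEMMAS AND PROOFS =====

-- the inner column loop adds w for each "O" among the scanned cells
theorem pv_foldl_countO (l : List String) (w : Int) :
    ∀ a : Int, l.foldl (fun acc x => if x = "O" then acc + w else acc) a
      = a + w * (l.count "O" : Int) := by
  induction l with
  | nil => intro a; simp
  | cons x xs ih =>
    intro a
    by_cases hx : x = "O" <;> simp [List.foldl_cons, hx, ih]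
    all_goals try ring

-- A's inner loop over j ∈ range(m) equals a weighted count over the first m cells
theorem pv_inner_loop (row : List String) (m : Nat) (hm : m ≤ row.length) (w a : Int) :
    (PySem.List.pyRange 0 (m : Int) 1).foldl
      (fun acc j => if PySem.List.pyGetD row j "" = "O" then acc + w else acc) a
      = a + w * ((row.take m).count "O" : Int) := by
  have hlen : ((row.take m).length : Int) = (m : Int) := by
    simp [List.length_take, Nat.min_eq_left hm]
  have hcongr :
      (PySem.List.pyRange 0 (m : Int) 1).foldl
        (fun acc j => if PySem.List.pyGetD row j "" = "O" then acc + w else acc) a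
      = (PySem.List.pyRange 0 (m : Int) 1).foldl
        (fun acc j => if PySem.List.pyGetD (row.take m) j "" = "O" then acc + w else acc) a := by
    apply PySem.List.foldl_congr_mem
    intro acc j hj
    rcases (PySem.List.mem_pyRange_one).1 hj with ⟨hj0, hjm⟩
    have hjlt : j.toNat < m := by omega
    have h1 : PySem.List.pyGetD row j "" = row[j.toNat]'(by omega) := by
      rw [PySem.List.pyGetD_eq_getElem] <;> omega
    have h2 : PySem.List.pyGetD (row.take m) j "" = (row.take m)[j.toNat]'(by
        simp [List.length_take]; omega) := by
      rw [PySem.List.pyGetD_eq_getElem (row.take m) "" hj0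
        (by simp [List.length_take]; omega)]
    rw [h1, h2, List.getElem_take]
  rw [hcongr, ← hlen,
    PySem.List.foldl_pyRange_zero_pyGetD' (row.take m) ""
      (fun acc x => if x = "O" then acc + w else acc) a,
    pv_foldl_countO]

-- A equals the weighted sum of counts over the first-m-cells of each row
theorem pv_A_eq (grid : List (List String)) (hne : grid ≠ [])
    (hlen : ∀ row ∈ grid, (grid.headD []).length ≤ row.length) :
    north_load grid
      = ((PySem.List.pyRange 0 (grid.length : Int) 1).map
          (fun i => ((grid.length : Int) - i) *
            (((PySem.List.pyGetD grid i []).take (grid.headD []).length).count "O" : Int))).sum := by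
  unfold north_load
  have hm0 : PySem.List.pyGetD grid 0 [] = grid.headD [] := by
    cases grid with
    | nil => simp at hne
    | cons r rs => simp [PySem.List.pyGetD, PySem.List.pyGet?, PySem.List.pyIdx?]
  simp only [hm0]
  have hstep :
      (PySem.List.pyRange 0 (grid.length : Int) 1).foldl
        (fun ans i =>
          (PySem.List.pyRange 0 ((grid.headD []).length : Int) 1).foldl
            (fun a j => if PySem.List.pyGetD (PySem.List.pyGetD grid i []) j "" = "O"
              then a + ((grid.length : Int) - i) else a) ans) 0
      = (PySem.List.pyRange 0 (grid.length : Int) 1).foldl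
        (fun ans i => ans + ((grid.length : Int) - i) *
          (((PySem.List.pyGetD grid i []).take (grid.headD []).length).count "O" : Int)) 0 := by
    apply PySem.List.foldl_congr_mem
    intro ans i hi
    rcases (PySem.List.mem_pyRange_one).1 hi with ⟨hi0, hin⟩
    have hrow : PySem.List.pyGetD grid i [] ∈ grid := by
      have : PySem.List.pyGetD grid i [] = grid[i.toNat]'(by omega) := by
        rw [PySem.List.pyGetD_eq_getElem] <;> omega
      rw [this]; exact List.getElem_mem _
    exact pv_inner_loop _ _ (hlen _ hrow) _ ans
  rw [hstep, PySem.List.foldl_add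
    (g := fun i => ((grid.length : Int) - i) *
      (((PySem.List.pyGetD grid i []).take (grid.headD []).length).count "O" : Int))]
  simp

-- recursive weighted sum: row at depth len(rs) below the top weighs len(rs)+1
def pvW : List (List String) → Int
  | [] => 0
  | r :: rs => ((rs.length : Int) + 1) * (PySem.List.count r "O" : Int) + pvW rs

-- B's fold computes pvW: the running count s is re-added once per remaining row
theorem pv_fold (rows : List (List String)) : ∀ s t : Int,
    (rows.foldl (fun (p : Int × Int) row =>
      let seen := p.1 + (PySem.List.count row "O" : Int)
      (seen, p.2 + seen)) (s, t)).2
    = t + (rows.length : Int) * s + pvW rows := by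
  induction rows with
  | nil => intro s t; simp [pvW]
  | cons r rs ih =>
    intro s t
    simp only [List.foldl_cons, pvW]
    rw [ih]
    push_cast [List.length_cons]
    ring

-- the indexed weighted sum over pyRange equals pvW (full-row counts)
theorem pv_mapsum (grid : List (List String)) :
    ((PySem.List.pyRange 0 (grid.length : Int) 1).map
      (fun i => ((grid.length : Int) - i) * ((PySem.List.pyGetD grid i []).count "O" : Int))).sum
    = pvW grid := by
  induction grid with
  | nil => simp [PySem.List.pyRange, pvW]
  | cons r rs ih =>
    rw [PySem.List.pyRange_one] at *
    simp only [sub_zero, Int.toNat_natCast, zero_add] at *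
    rw [List.map_map] at ih
    simp only [Function.comp_def] at ih
    rw [List.length_cons, List.range_succ_eq_map]
    simp only [List.map_cons, List.map_map, List.sum_cons, Function.comp_def,
      Nat.succ_eq_add_one, Nat.cast_zero, Nat.cast_add, Nat.cast_one]
    have h0 : PySem.List.pyGetD (r :: rs) (0 : Int) [] = r := by
      simp [PySem.List.pyGetD, PySem.List.pyGet?, PySem.List.pyIdx?]
    have hshift : ∀ k : Nat,
        PySem.List.pyGetD (r :: rs) (((k + 1 : Nat) : Int)) [] = PySem.List.pyGetD rs (k : Int) [] := by
      intro k
      rw [PySem.List.pyGetD_natCast, PySem.List.pyGetD_natCast]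
      simp [List.getD]
    have hcongr :
        (List.range rs.length).map (fun k =>
          ((rs.length : Int) + 1 - (((k : Nat) : Int) + 1)) *
            ((PySem.List.pyGetD (r :: rs) (((k : Nat) : Int) + 1) []).count "O" : Int))
        = (List.range rs.length).map (fun k =>
          ((rs.length : Int) - (k : Nat)) * ((PySem.List.pyGetD rs ((k : Nat) : Int) []).count "O" : Int)) := by
      apply List.map_congr_left
      intro k _
      have h := hshift k
      push_cast at h
      rw [h]
      ring
    rw [h0, hcongr, ih]
    simp only [pvW, PySem.List.count_eq]
    ring

-- B equals the weighted sum of full-row counts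
theorem pv_B_eq (grid : List (List String)) :
    north_load_alt grid
      = ((PySem.List.pyRange 0 (grid.length : Int) 1).map
          (fun i => ((grid.length : Int) - i) *
            ((PySem.List.pyGetD grid i []).count "O" : Int))).sum := by
  unfold north_load_alt
  rw [pv_fold, pv_mapsum]
  simp

theorem pv_count_split (row : List String) (m : Nat) :
    (row.count "O" : Int)
      = ((row.take m).count "O" : Int) + ((row.drop m).count "O" : Int) := by
  have h := List.count_append (a := "O") (l₁ := row.take m) (l₂ := row.drop m)
  rw [List.take_append_drop] at h
  push_cast [h]; ring

-- ===== VERDICT (by name: the statement is the Claim_ definition above) =====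
theorem north_load_spec : Claim_unchanged_north_load := by
  intro grid _hdom ⟨hne, hlen⟩ hnd
  rw [pv_A_eq grid hne hlen, pv_B_eq grid]
  apply congrArg
  apply List.map_congr_left
  intro i hi
  rcases (PySem.List.mem_pyRange_one).1 hi with ⟨hi0, hin⟩
  have hrow : PySem.List.pyGetD grid i [] ∈ grid := by
    have : PySem.List.pyGetD grid i [] = grid[i.toNat]'(by omega) := by
      rw [PySem.List.pyGetD_eq_getElem] <;> omega
    rw [this]; exact List.getElem_mem _
  have hdropO : ((PySem.List.pyGetD grid i []).drop (grid.headD []).length).count "O" = 0 := by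
    rw [List.count_eq_zero]
    intro hmem
    exact hnd ⟨_, hrow, hmem⟩
  rw [pv_count_split (PySem.List.pyGetD grid i []) (grid.headD []).length, hdropO]
  simp

theorem north_load_changed : Claim_changed_north_load := by
  unfold Claim_changed_north_load; decide

theorem north_load_tight : Claim_exact_north_load := by
  intro grid _hdom ⟨hne, hlen⟩ hd
  rw [pv_A_eq grid hne hlen, pv_B_eq grid]
  apply ne_of_lt
  apply List.sum_lt_sum
  · intro i hi
    rcases (PySem.List.mem_pyRange_one).1 hi with ⟨hi0, hin⟩
    have hw : (0 : Int) < (grid.length : Int) - i := by omega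
    apply mul_le_mul_of_nonneg_left _ (le_of_lt hw)
    rw [pv_count_split (PySem.List.pyGetD grid i []) (grid.headD []).length]
    have : (0 : Int) ≤ (((PySem.List.pyGetD grid i []).drop (grid.headD []).length).count "O" : Int) := by positivity
    omega
  · rcases hd with ⟨row, hrow, hO⟩
    rcases List.mem_iff_getElem.1 hrow with ⟨k, hk, hkr⟩
    refine ⟨(k : Int), (PySem.List.mem_pyRange_one).2 ⟨by omega, by exact_mod_cast hk⟩, ?_⟩
    have hget : PySem.List.pyGetD grid (k : Int) [] = row := by
      rw [PySem.List.pyGetD_eq_getElem grid [] (by omega) (by exact_mod_cast hk)]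
      simpa using hkr
    rw [hget, pv_count_split row (grid.headD []).length]
    have hw : (0 : Int) < (grid.length : Int) - (k : Int) := by
      have : k < grid.length := hk; omega
    have hdpos : 0 < (row.drop (grid.headD []).length).count "O" := List.count_pos_iff.2 hO
    have h1 : (0 : Int) < ((row.drop (grid.headD []).length).count "O" : Int) := by exact_mod_cast hdpos
    nlinarith [h1, hw]
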